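-- pv_equiv track=rewrite | github.com/ddcodepl/n0mad | core/managers/enhanced_status_transition_manager.py | _requires_commit
-- ===== SOURCE A (Python) =====
-- def _requires_commit(from_status: str, to_status: str) -> bool:
--     """
--     Determine if a status transition requires a commit.
--
--     Args:
--         from_status: Current status
--         to_status: Target status
--
--     Returns:
--         True if commit is required
--     """
--     # Define transitions that require commits
--     commit_required_transitions = [
--         ("in-progress", "done"),
--         ("In progress", "Done"),
--         ("IN_PROGRESS", "DONE"),
--         ("in_progress", "finished"),
--         ("In Progress", "Finished")
--     ]
--
--     # Normalize for case-insensitive comparison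
--     normalized_transition = (from_status.lower().strip(), to_status.lower().strip())
--
--     for required_from, required_to in commit_required_transitions:
--         if (normalized_transition[0] == required_from.lower() and
--             normalized_transition[1] == required_to.lower()):
--             return True
--
--     # Also check if target status indicates completion
--     completion_statuses = ['done', 'finished', 'complete', 'completed']
--     return to_status.lower().strip() in completion_statuses
-- ===== SOURCE B (Python) =====
-- def _requires_commit(from_status: str, to_status: str) -> bool:
--     # The transition table in A is redundant: every target it matches
--     # ('done'/'finished') is already a completion status, so commit is
--     # required exactly when the normalized target status is a completion status.
--     return to_status.lower().strip() in ('done', 'finished', 'complete', 'completed')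
-- ===== Notes on version B (the rewrite author's own statement) =====
-- stated objective: simpler
-- what changed: Dropped A's transition-pair loop entirely (its matches are subsumed by the completion-status membership test) and kept only the single normalized membership check.
import Mathlib
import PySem

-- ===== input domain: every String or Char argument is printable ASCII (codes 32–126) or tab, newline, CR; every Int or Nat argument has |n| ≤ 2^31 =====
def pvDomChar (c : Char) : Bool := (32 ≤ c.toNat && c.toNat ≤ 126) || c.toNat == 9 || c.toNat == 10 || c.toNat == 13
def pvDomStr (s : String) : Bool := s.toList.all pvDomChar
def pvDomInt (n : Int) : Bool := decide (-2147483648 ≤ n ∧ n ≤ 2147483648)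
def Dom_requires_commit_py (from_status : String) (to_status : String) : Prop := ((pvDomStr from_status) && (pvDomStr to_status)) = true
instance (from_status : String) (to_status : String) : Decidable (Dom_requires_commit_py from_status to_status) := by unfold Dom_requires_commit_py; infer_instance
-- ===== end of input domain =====

-- B drops A's redundant transition-pair loop and keeps only the completion-status membership test (objective: simpler).
-- ===== PORT A =====
def requires_commit_py (from_status : String) (to_status : String) : Bool :=
  let commit_required_transitions : List (String × String) :=
    [("in-progress", "done"), ("In progress", "Done"), ("IN_PROGRESS", "DONE"),
     ("in_progress", "finished"), ("In Progress", "Finished")]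
  let normalized_transition : String × String :=
    (PySem.Str.strip (PySem.Str.lower from_status), PySem.Str.strip (PySem.Str.lower to_status))
  -- for-loop with early 'return True' = any over the list, else fall through
  if commit_required_transitions.any (fun p =>
      normalized_transition.1 == PySem.Str.lower p.1 && normalized_transition.2 == PySem.Str.lower p.2)
  then true
  else
    let completion_statuses : List String := ["done", "finished", "complete", "completed"]
    completion_statuses.contains (PySem.Str.strip (PySem.Str.lower to_status))

-- ===== PORT B =====
def requires_commit_py_alt (from_status : String) (to_status : String) : Bool :=
  (["done", "finished", "complete", "completed"] : List String).contains
    (PySem.Str.strip (PySem.Str.lower to_status))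

-- ===== PRECONDITION & SPEC =====
def Spec_requires_commit_py (from_status : String) (to_status : String) (out : Bool) : Prop := out = requires_commit_py_alt from_status to_status
instance (from_status : String) (to_status : String) (out : Bool) : Decidable (Spec_requires_commit_py from_status to_status out) := by unfold Spec_requires_commit_py; infer_instance

-- ===== CLAIM (what is proved, stated in full; the proofs are below) =====
def Claim_equal_requires_commit_py : Prop := ∀ (from_status : String) (to_status : String), Dom_requires_commit_py from_status to_status → Spec_requires_commit_py from_status to_status (requires_commit_py from_status to_status)

-- ===== LEMMAS AND PROOFS =====

-- ===== VERDICT (by name: the statement is the Claim_ definition above) =====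
theorem requires_commit_py_spec : Claim_equal_requires_commit_py := by
  intro from_status to_status _
  unfold Spec_requires_commit_py requires_commit_py requires_commit_py_alt
  simp only [List.any_cons, List.any_nil, List.contains_eq_mem, List.mem_cons, List.not_mem_nil,
    or_false, Bool.or_false]
  generalize PySem.Str.strip (PySem.Str.lower from_status) = nf
  generalize hnt : PySem.Str.strip (PySem.Str.lower to_status) = nt
  have hd : PySem.Str.lower "done" = "done" := by decide
  have hD : PySem.Str.lower "Done" = "done" := by decide
  have hDD : PySem.Str.lower "DONE" = "done" := by decide
  have hf : PySem.Str.lower "finished" = "finished" := by decide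
  have hF : PySem.Str.lower "Finished" = "finished" := by decide
  split
  · next h =>
    simp only [Bool.or_eq_true, Bool.and_eq_true, beq_iff_eq] at h
    have : nt = "done" ∨ nt = "finished" := by
      rcases h with ⟨_,h⟩|⟨_,h⟩|⟨_,h⟩|⟨_,h⟩|⟨_,h⟩ <;> simp only [hd, hD, hDD, hf, hF] at h <;> simp [h]
    simp [this.elim (fun h => Or.inl h) (fun h => Or.inr (Or.inl h))]
  · rfl
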